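-- pv_equiv track=rewrite | github.com/SanneBreed/OrgelProject | src/marcussen/constants.py | _extract_phrase
-- ===== SOURCE A (Python) =====
-- def _extract_phrase(tokens: list[str], mapping: dict[str, str]) -> str | None:
--     if not tokens:
--         return None
--     lowered = [t.lower() for t in tokens]
--     for width in range(len(tokens), 0, -1):
--         for start in range(0, len(tokens) - width + 1):
--             phrase = " ".join(lowered[start : start + width])
--             if phrase in mapping:
--                 return mapping[phrase]
--     return None
-- ===== SOURCE B (Python) =====
-- def _extract_phrase(tokens: list[str], mapping: dict[str, str]) -> str | None:
--     if not tokens: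
--         return None
--     lowered = [t.lower() for t in tokens]
--     maxlen = max((len(k) for k in mapping), default=-1)
--     n = len(lowered)
--     best_w = 0
--     best_val = None
--     for i in range(n):
--         phrase = lowered[i]
--         w = 1
--         j = i + 1
--         while len(phrase) <= maxlen:
--             if w > best_w and phrase in mapping:
--                 best_w = w
--                 best_val = mapping[phrase]
--             if j >= n:
--                 break
--             phrase = phrase + " " + lowered[j]
--             w += 1
--             j += 1
--     return best_val
-- ===== Notes on version B (the rewrite author's own statement) =====
-- stated objective: faster
-- what changed: Replaces the width-descending double loop that re-joins every window from scratch with a single start-major pass that grows each window's phrase incrementally, tracks the best (widest, then earliest) match, and prunes a start as soon as the phrase is longer than the longest mapping key.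
import Mathlib
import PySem

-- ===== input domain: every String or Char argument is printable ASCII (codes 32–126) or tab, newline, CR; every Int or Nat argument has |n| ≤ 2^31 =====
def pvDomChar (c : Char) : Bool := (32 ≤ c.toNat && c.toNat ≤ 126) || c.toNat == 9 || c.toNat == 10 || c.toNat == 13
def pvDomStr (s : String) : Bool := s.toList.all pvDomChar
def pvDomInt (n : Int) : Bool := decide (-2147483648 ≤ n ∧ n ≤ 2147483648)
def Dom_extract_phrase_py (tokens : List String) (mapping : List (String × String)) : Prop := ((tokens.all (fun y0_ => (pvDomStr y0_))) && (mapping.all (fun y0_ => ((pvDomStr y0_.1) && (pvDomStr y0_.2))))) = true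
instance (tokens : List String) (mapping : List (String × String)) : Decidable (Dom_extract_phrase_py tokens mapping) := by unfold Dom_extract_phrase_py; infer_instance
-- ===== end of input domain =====

-- B replaces A's width-descending double loop (re-joining every window) by one start-major pass
-- that grows each phrase incrementally, keeps the best (widest, then earliest) match, and prunes a
-- start once the phrase is longer than the longest mapping key; objective: faster.


-- ===== PORT A =====
-- for width in range(n, 0, -1): for start in range(0, n-width+1): phrase = " ".join(lowered[start:start+width]); if phrase in mapping: return mapping[phrase]
def extract_phrase_py (tokens : List String) (mapping : List (String × String)) : Option String :=
  if tokens.isEmpty then none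
  else
    let lowered := tokens.map PySem.Str.lower
    let n : Int := tokens.length
    (PySem.List.pyRange n 0 (-1)).findSome? (fun width =>
      (PySem.List.pyRange 0 (n - width + 1) 1).findSome? (fun start =>
        let phrase := PySem.Str.join " " (PySem.List.slice lowered (some start) (some (start + width)))
        (PySem.Dict.mk mapping).get? phrase))

-- ===== PORT B =====
-- maxlen = max((len(k) for k in mapping), default=-1); the fold from -1 is exact since every len ≥ 0
def pvMaxLen (mapping : List (String × String)) : Int :=
  mapping.foldl (fun acc kv => max acc (PySem.Str.len kv.1)) (-1)

-- inner while loop of B: extend the phrase at one start, pruning once len(phrase) > maxlen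
def pvExtend (mapping : List (String × String)) (maxlen : Int) :
    List String → String → Nat → Nat × Option String → Nat × Option String
  | rest, phrase, w, best =>
    if maxlen < PySem.Str.len phrase then best
    else
      let best1 := if best.1 < w then
          match (PySem.Dict.mk mapping).get? phrase with
          | some v => (w, some v)
          | none => best
        else best
      match rest with
      | [] => best1
      | t :: rest' => pvExtend mapping maxlen rest' (phrase ++ " " ++ t) (w + 1) best1

-- 'for i in range(n)' over starts, ported as structural recursion over the suffixes of lowered
def pvOuter (mapping : List (String × String)) (maxlen : Int) :
    List String → Nat × Option String → Nat × Option String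
  | [], best => best
  | p :: rest, best => pvOuter mapping maxlen rest (pvExtend mapping maxlen rest p 1 best)

def extract_phrase_py_alt (tokens : List String) (mapping : List (String × String)) : Option String :=
  if tokens.isEmpty then none
  else
    let lowered := tokens.map PySem.Str.lower
    (pvOuter mapping (pvMaxLen mapping) lowered (0, none)).2

-- ===== PRECONDITION & SPEC =====
def Spec_extract_phrase_py (tokens : List String) (mapping : List (String × String)) (out : Option String) : Prop := out = extract_phrase_py_alt tokens mapping
instance (tokens : List String) (mapping : List (String × String)) (out : Option String) : Decidable (Spec_extract_phrase_py tokens mapping out) := by unfold Spec_extract_phrase_py; infer_instance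

-- ===== CLAIM (what is proved, stated in full; the proofs are below) =====
def Claim_equal_extract_phrase_py : Prop := ∀ (tokens : List String) (mapping : List (String × String)), Dom_extract_phrase_py tokens mapping → Spec_extract_phrase_py tokens mapping (extract_phrase_py tokens mapping)

-- ===== LEMMAS AND PROOFS =====

-- lookup of the window of width w starting at s
def pvG (m : List (String × String)) (low : List String) (s w : Nat) : Option String :=
  (PySem.Dict.mk m).get? (PySem.Str.join " " ((low.drop s).take w))

-- best-tracking update: take the new (width, value) iff it matched and is strictly wider
def pvSel (b it : Nat × Option String) : Nat × Option String :=
  if b.1 < it.1 then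
    match it.2 with
    | some v => (it.1, some v)
    | none => b
  else b

-- the items (width, lookup) examined at one start (suffix suf), widths ascending
def pvSufItems (m : List (String × String)) (suf : List String) : List (Nat × Option String) :=
  (List.range suf.length).map
    (fun k => (k + 1, (PySem.Dict.mk m).get? (PySem.Str.join " " (suf.take (k + 1)))))

-- all items, starts ascending
def pvAllItems (m : List (String × String)) : List String → List (Nat × Option String)
  | [] => []
  | p :: rest => pvSufItems m (p :: rest) ++ pvAllItems m rest

def pvMaxW (items : List (Nat × Option String)) (t : Nat) : Nat :=
  items.foldl (fun acc it => if acc < it.1 ∧ it.2.isSome then it.1 else acc) t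

def pvFirstAt (items : List (Nat × Option String)) (W : Nat) : Option String :=
  items.findSome? (fun it => if it.1 = W then it.2 else none)

-- unpruned inner loop and its item list
def pvExtendNP (m : List (String × String)) :
    List String → String → Nat → Nat × Option String → Nat × Option String
  | [], phrase, w, b => pvSel b (w, (PySem.Dict.mk m).get? phrase)
  | t :: rest, phrase, w, b =>
      pvExtendNP m rest (phrase ++ " " ++ t) (w + 1) (pvSel b (w, (PySem.Dict.mk m).get? phrase))

def pvItems (m : List (String × String)) : List String → String → Nat → List (Nat × Option String)
  | [], phrase, w => [(w, (PySem.Dict.mk m).get? phrase)]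
  | t :: rest, phrase, w =>
      (w, (PySem.Dict.mk m).get? phrase) :: pvItems m rest (phrase ++ " " ++ t) (w + 1)

def pvJoinExt (p : String) (l : List String) : String :=
  l.foldl (fun acc t => acc ++ " " ++ t) p

def pvWidthsDesc : Nat → List Nat
  | 0 => []
  | n + 1 => (n + 1) :: pvWidthsDesc n

def pvScanW (m : List (String × String)) (W : Nat) : List String → Option String
  | [] => none
  | p :: rest =>
      (if W ≤ rest.length + 1
        then (PySem.Dict.mk m).get? (PySem.Str.join " " ((p :: rest).take W)) else none).or
      (pvScanW m W rest)

theorem pvSel_fst (b it : Nat × Option String) :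
    (pvSel b it).1 = if b.1 < it.1 ∧ it.2.isSome then it.1 else b.1 := by
  rcases it with ⟨w, v⟩
  cases v <;> simp [pvSel] <;> split <;> simp_all

theorem pvMaxW_cons (it : Nat × Option String) (rest : List (Nat × Option String)) (t : Nat) :
    pvMaxW (it :: rest) t = pvMaxW rest (if t < it.1 ∧ it.2.isSome then it.1 else t) := by
  simp [pvMaxW]

theorem le_pvMaxW (items : List (Nat × Option String)) : ∀ t, t ≤ pvMaxW items t := by
  induction items with
  | nil => intro t; simp [pvMaxW]
  | cons it rest ih =>
    intro t
    rw [pvMaxW_cons]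
    split
    · exact le_trans (le_of_lt (by omega)) (ih it.1)
    · exact ih t

theorem pvMaxW_ub (items : List (Nat × Option String)) :
    ∀ t, ∀ it ∈ items, it.2.isSome → it.1 ≤ pvMaxW items t := by
  induction items with
  | nil => intro t it h; simp at h
  | cons hd rest ih =>
    intro t it hmem hs
    rw [pvMaxW_cons]
    rcases List.mem_cons.mp hmem with h | h
    · subst h
      by_cases hc : t < it.1 ∧ it.2.isSome
      · simp only [if_pos hc]; exact le_pvMaxW rest it.1
      · have : it.1 ≤ t := by
          rcases not_and_or.mp hc with h1 | h2
          · omega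
          · exact absurd hs h2
        simp only [if_neg hc]
        exact le_trans this (le_pvMaxW rest t)
    · exact ih _ it h hs

theorem pvMaxW_mem (items : List (Nat × Option String)) :
    ∀ t, pvMaxW items t = t ∨ ∃ it ∈ items, it.1 = pvMaxW items t ∧ it.2.isSome := by
  induction items with
  | nil => intro t; left; simp [pvMaxW]
  | cons hd rest ih =>
    intro t
    rw [pvMaxW_cons]
    by_cases hc : t < hd.1 ∧ hd.2.isSome
    · simp only [if_pos hc]
      rcases ih hd.1 with h | ⟨it, hmem, h⟩
      · right; exact ⟨hd, List.mem_cons_self .., by rw [h]; exact ⟨rfl, hc.2⟩⟩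
      · right; exact ⟨it, List.mem_cons_of_mem _ hmem, h⟩
    · simp only [if_neg hc]
      rcases ih t with h | ⟨it, hmem, h⟩
      · left; exact h
      · right; exact ⟨it, List.mem_cons_of_mem _ hmem, h⟩

theorem pvSel_spec (items : List (Nat × Option String)) :
    ∀ b, (items.foldl pvSel b).2 =
      if pvMaxW items b.1 = b.1 then b.2 else pvFirstAt items (pvMaxW items b.1) := by
  induction items with
  | nil => intro b; simp [pvMaxW, pvFirstAt]
  | cons it rest ih =>
    intro b
    rw [List.foldl_cons, ih, pvMaxW_cons, pvSel_fst]
    by_cases hc : b.1 < it.1 ∧ it.2.isSome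
    · rcases it with ⟨w, v⟩
      rcases v with _ | v
      · simp at hc
      simp only [if_pos hc]
      have hsel : pvSel b (w, some v) = (w, some v) := by
        simp [pvSel, hc.1]
      rw [hsel]
      have hle : w ≤ pvMaxW rest w := le_pvMaxW rest w
      by_cases h2 : pvMaxW rest w = w
      · rw [if_pos h2, h2, if_neg (by simp at hc ⊢; omega)]
        simp [pvFirstAt, List.findSome?_cons]
      · rw [if_neg h2, if_neg (by simp at hc ⊢; omega)]
        have hne : w ≠ pvMaxW rest w := fun h => h2 h.symm
        simp [pvFirstAt, List.findSome?_cons, hne]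
    · have hsel : pvSel b it = b := by
        rcases it with ⟨w, v⟩
        cases v
        · simp only [pvSel]; split <;> rfl
        · simp only [Option.isSome_some, and_true, not_lt] at hc
          simp only [pvSel]
          rw [if_neg (by omega)]
      rw [hsel, if_neg hc]
      by_cases h2 : pvMaxW rest b.1 = b.1
      · rw [if_pos h2, if_pos h2]
      · rw [if_neg h2, if_neg h2]
        have hW : b.1 < pvMaxW rest b.1 :=
          lt_of_le_of_ne (le_pvMaxW rest b.1) (fun h => h2 h.symm)
        have hhead : (if it.1 = pvMaxW rest b.1 then it.2 else none) = none := by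
          by_cases he : it.1 = pvMaxW rest b.1
          · rw [if_pos he]
            rcases not_and_or.mp hc with h1 | h1
            · omega
            · exact Option.not_isSome_iff_eq_none.mp h1
          · rw [if_neg he]
        simp [pvFirstAt, List.findSome?_cons, hhead]

theorem pvJoin_two (p t : String) (l : List String) :
    PySem.Str.join " " (p :: t :: l) = PySem.Str.join " " ((p ++ " " ++ t) :: l) := by
  have h : (PySem.Str.join " " (p :: t :: l)).toList
      = (PySem.Str.join " " ((p ++ " " ++ t) :: l)).toList := by
    cases l with
    | nil =>
      simp [PySem.Str.toList_join, PySem.Chars.join_cons_cons, PySem.Chars.join_singleton,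
        List.append_assoc]
    | cons q rest =>
      simp [PySem.Str.toList_join, PySem.Chars.join_cons_cons, List.append_assoc]
  calc PySem.Str.join " " (p :: t :: l)
      = String.ofList (PySem.Str.join " " (p :: t :: l)).toList := by
        rw [String.ofList_toList]
    _ = String.ofList (PySem.Str.join " " ((p ++ " " ++ t) :: l)).toList := by rw [h]
    _ = PySem.Str.join " " ((p ++ " " ++ t) :: l) := by rw [String.ofList_toList]

theorem pvJoin_foldl (l : List String) : ∀ p, PySem.Str.join " " (p :: l) = pvJoinExt p l := by
  induction l with
  | nil =>
    intro p
    have : (PySem.Str.join " " [p]).toList = p.toList := by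
      simp [PySem.Str.toList_join, PySem.Chars.join_singleton]
    calc PySem.Str.join " " [p] = String.ofList (PySem.Str.join " " [p]).toList := by
          rw [String.ofList_toList]
      _ = p := by rw [this, String.ofList_toList]
  | cons t l ih =>
    intro p
    rw [pvJoin_two, ih (p ++ " " ++ t)]
    rfl

theorem pvExtendNP_eq_foldl (m : List (String × String)) :
    ∀ (rest : List String) (phrase : String) (w : Nat) (b : Nat × Option String),
      pvExtendNP m rest phrase w b = (pvItems m rest phrase w).foldl pvSel b := by
  intro rest
  induction rest with
  | nil => intro phrase w b; simp [pvExtendNP, pvItems]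
  | cons t rest ih => intro phrase w b; simp [pvExtendNP, pvItems, ih]

theorem pvItems_eq (m : List (String × String)) :
    ∀ (rest : List String) (p : String) (w : Nat),
      pvItems m rest p w = (List.range (rest.length + 1)).map
        (fun k => (w + k, (PySem.Dict.mk m).get? (pvJoinExt p (rest.take k)))) := by
  intro rest
  induction rest with
  | nil => intro p w; simp [pvItems, pvJoinExt]
  | cons t rest ih =>
    intro p w
    rw [pvItems, ih (p ++ " " ++ t) (w + 1)]
    conv_rhs => rw [List.range_succ_eq_map]
    rw [List.map_cons, List.map_map]
    congr 1
    simp only [List.length_cons]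
    apply List.map_congr_left
    intro k _
    simp only [Function.comp_apply, List.take_succ_cons]
    rw [show w + 1 + k = w + (k + 1) by omega]
    rfl

theorem pvItems_eq_sufItems (m : List (String × String)) (p : String) (rest : List String) :
    pvItems m rest p 1 = pvSufItems m (p :: rest) := by
  rw [pvItems_eq, pvSufItems]
  simp only [List.length_cons]
  apply List.map_congr_left
  intro k _
  rw [← pvJoin_foldl (rest.take k) p, show 1 + k = k + 1 by omega]
  rfl

-- every mapping key has length ≤ pvMaxLen
theorem pvMaxLen_ub (m : List (String × String)) (ph : String) (v : String)
    (h : (PySem.Dict.mk m).get? ph = some v) : PySem.Str.len ph ≤ pvMaxLen m := by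
  have hmem : (ph, v) ∈ (PySem.Dict.mk m).items := PySem.Dict.mem_items_of_get?_eq_some _ h
  have hmem' : (ph, v) ∈ m := hmem
  exact (PySem.List.le_foldl_max_int m (fun kv => PySem.Str.len kv.1) (-1)).2 (ph, v) hmem'

theorem pvLen_ext (phrase t : String) :
    PySem.Str.len phrase < PySem.Str.len (phrase ++ " " ++ t) := by
  rw [PySem.Str.len_append, PySem.Str.len_append]
  have h1 : PySem.Str.len " " = 1 := by decide
  have h2 : (0 : Int) ≤ PySem.Str.len t := by rw [PySem.Str.len_eq]; positivity
  omega

theorem pvExtendNP_nil (m : List (String × String)) (phrase : String) (w : Nat)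
    (b : Nat × Option String) :
    pvExtendNP m [] phrase w b = pvSel b (w, (PySem.Dict.mk m).get? phrase) := rfl

theorem pvExtendNP_cons (m : List (String × String)) (t : String) (rest : List String)
    (phrase : String) (w : Nat) (b : Nat × Option String) :
    pvExtendNP m (t :: rest) phrase w b
      = pvExtendNP m rest (phrase ++ " " ++ t) (w + 1)
          (pvSel b (w, (PySem.Dict.mk m).get? phrase)) := rfl

theorem pvExtend_nil (m : List (String × String)) (L : Int) (phrase : String) (w : Nat)
    (b : Nat × Option String) :
    pvExtend m L [] phrase w b
      = if L < PySem.Str.len phrase then b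
        else pvSel b (w, (PySem.Dict.mk m).get? phrase) := rfl

theorem pvExtend_cons (m : List (String × String)) (L : Int) (t : String) (rest : List String)
    (phrase : String) (w : Nat) (b : Nat × Option String) :
    pvExtend m L (t :: rest) phrase w b
      = if L < PySem.Str.len phrase then b
        else pvExtend m L rest (phrase ++ " " ++ t) (w + 1)
            (pvSel b (w, (PySem.Dict.mk m).get? phrase)) := rfl

theorem pvGet_none_of_long (m : List (String × String)) (phrase : String)
    (hlen : pvMaxLen m < PySem.Str.len phrase) : (PySem.Dict.mk m).get? phrase = none := by
  cases hge : (PySem.Dict.mk m).get? phrase with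
  | none => rfl
  | some v => exact absurd (pvMaxLen_ub m phrase v hge) (by omega)

theorem pvSel_none (b : Nat × Option String) (w : Nat) : pvSel b (w, none) = b := by
  simp only [pvSel]; split <;> rfl

theorem pvExtendNP_noop (m : List (String × String)) :
    ∀ (rest : List String) (phrase : String) (w : Nat) (b : Nat × Option String),
      pvMaxLen m < PySem.Str.len phrase → pvExtendNP m rest phrase w b = b := by
  intro rest
  induction rest with
  | nil =>
    intro phrase w b hlen
    rw [pvExtendNP_nil, pvGet_none_of_long m phrase hlen, pvSel_none]
  | cons t rest ih =>
    intro phrase w b hlen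
    rw [pvExtendNP_cons, pvGet_none_of_long m phrase hlen, pvSel_none]
    exact ih _ _ b (lt_trans hlen (pvLen_ext phrase t))

theorem pvExtend_eq_NP (m : List (String × String)) :
    ∀ (rest : List String) (phrase : String) (w : Nat) (b : Nat × Option String),
      pvExtend m (pvMaxLen m) rest phrase w b = pvExtendNP m rest phrase w b := by
  intro rest
  induction rest with
  | nil =>
    intro phrase w b
    rw [pvExtend_nil, pvExtendNP_nil]
    by_cases hlen : pvMaxLen m < PySem.Str.len phrase
    · rw [if_pos hlen, pvGet_none_of_long m phrase hlen, pvSel_none]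
    · rw [if_neg hlen]
  | cons t rest ih =>
    intro phrase w b
    rw [pvExtend_cons, pvExtendNP_cons]
    by_cases hlen : pvMaxLen m < PySem.Str.len phrase
    · rw [if_pos hlen, pvGet_none_of_long m phrase hlen, pvSel_none,
        pvExtendNP_noop m rest _ _ b (lt_trans hlen (pvLen_ext phrase t))]
    · rw [if_neg hlen, ih]

theorem pvOuter_eq (m : List (String × String)) :
    ∀ (l : List String) (b : Nat × Option String),
      pvOuter m (pvMaxLen m) l b = (pvAllItems m l).foldl pvSel b := by
  intro l
  induction l with
  | nil => intro b; simp [pvOuter, pvAllItems]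
  | cons p rest ih =>
    intro b
    rw [pvOuter, ih, pvAllItems, List.foldl_append]
    congr 1
    rw [pvExtend_eq_NP, pvExtendNP_eq_foldl, pvItems_eq_sufItems]

theorem pvFindSome?_map_congr {α β γ : Type} (l : List α) (f : α → γ)
    (F : γ → Option β) (G : α → Option β) (h : ∀ x ∈ l, F (f x) = G x) :
    (l.map f).findSome? F = l.findSome? G := by
  induction l with
  | nil => rfl
  | cons a l ih =>
    rw [List.map_cons, List.findSome?_cons, List.findSome?_cons, h a (List.mem_cons_self ..),
      ih (fun x hx => h x (List.mem_cons_of_mem a hx))]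

theorem pvWidths_cast : ∀ n : Nat, PySem.List.pyRange (n : Int) 0 (-1)
    = (pvWidthsDesc n).map ((fun w => (w : Int)) : Nat → Int) := by
  intro n
  induction n with
  | zero => rw [PySem.List.pyRange_neg_one_eq_nil (by norm_num)]; rfl
  | succ n ih =>
    rw [PySem.List.pyRange_neg_one_cons (by push_cast; omega)]
    have h1 : ((n + 1 : Nat) : Int) - 1 = (n : Int) := by push_cast; ring
    rw [h1, ih]
    rfl

theorem pvMem_widthsDesc : ∀ n w, w ∈ pvWidthsDesc n ↔ 1 ≤ w ∧ w ≤ n := by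
  intro n
  induction n with
  | zero => intro w; simp [pvWidthsDesc]; omega
  | succ n ih => intro w; simp [pvWidthsDesc, ih]; omega

theorem pvWidthsDesc_none (inner : Nat → Option String) :
    ∀ n, (∀ w, 1 ≤ w → w ≤ n → inner w = none) → (pvWidthsDesc n).findSome? inner = none := by
  intro n
  induction n with
  | zero => intro _; rfl
  | succ n ih =>
    intro h
    rw [pvWidthsDesc, List.findSome?_cons, h (n + 1) (by omega) (by omega)]
    exact ih (fun w h1 h2 => h w h1 (by omega))

theorem pvWidthsDesc_top (inner : Nat → Option String) (W : Nat) (v : String) :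
    ∀ n, 1 ≤ W → W ≤ n → (∀ w, W < w → w ≤ n → inner w = none) → inner W = some v →
      (pvWidthsDesc n).findSome? inner = some v := by
  intro n
  induction n with
  | zero => intro h1 h2 _ _; omega
  | succ n ih =>
    intro h1 h2 habove hsome
    rw [pvWidthsDesc, List.findSome?_cons]
    by_cases he : W = n + 1
    · rw [← he, hsome]
    · rw [habove (n + 1) (by omega) (by omega)]
      exact ih h1 (by omega) (fun w hw1 hw2 => habove w hw1 (by omega)) hsome

theorem pvBlockFind : ∀ (mlen : Nat) (v : Nat → Option String) (w0 W : Nat),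
    (((List.range mlen).map (fun k => (w0 + k, v k))).findSome?
        (fun it => if it.1 = W then it.2 else none))
      = if w0 ≤ W ∧ W < w0 + mlen then v (W - w0) else none := by
  intro mlen
  induction mlen with
  | zero => intro v w0 W; rw [if_neg (by omega)]; rfl
  | succ mlen ih =>
    intro v w0 W
    rw [List.range_succ_eq_map, List.map_cons, List.map_map]
    have hmap : (List.range mlen).map ((fun k => (w0 + k, v k)) ∘ Nat.succ)
        = (List.range mlen).map (fun k => ((w0 + 1) + k, (v ∘ Nat.succ) k)) := by
      apply List.map_congr_left
      intro k _
      simp only [Function.comp_apply]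
      rw [show w0 + (k + 1) = (w0 + 1) + k by omega]
    by_cases he : w0 + 0 = W
    · cases hv : v 0 with
      | some x =>
        rw [List.findSome?_cons_of_isSome (by simp [he, hv])]
        show (if w0 + 0 = W then some x else none) = _
        rw [if_pos he, if_pos (by omega), show W - w0 = 0 by omega, hv]
      | none =>
        rw [List.findSome?_cons_of_isNone (by simp [he, hv])]
        rw [hmap, ih, if_neg (by omega), show W - w0 = 0 by omega, hv]
        split <;> rfl
    · have hW' : (w0 = W) = False := eq_false (by omega)
      rw [List.findSome?_cons_of_isNone (by simp [hW'])]
      rw [hmap, ih]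
      by_cases hc : w0 + 1 ≤ W ∧ W < w0 + 1 + mlen
      · rw [if_pos hc, if_pos (by omega)]
        simp only [Function.comp_apply]
        congr 1
        omega
      · rw [if_neg hc, if_neg (by omega)]

theorem pvScanW_none_of_long (m : List (String × String)) (W : Nat) :
    ∀ l : List String, l.length < W → pvScanW m W l = none := by
  intro l
  induction l with
  | nil => intro _; rfl
  | cons p rest ih =>
    intro h
    rw [pvScanW, if_neg (by simp at h; omega), ih (by simp at h ⊢; omega)]
    rfl

theorem pvFirstAt_allItems (m : List (String × String)) (W : Nat) (hW : 1 ≤ W) :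
    ∀ l : List String, pvFirstAt (pvAllItems m l) W = pvScanW m W l := by
  intro l
  induction l with
  | nil => rfl
  | cons p rest ih =>
    rw [pvAllItems, pvScanW]
    have happ : pvFirstAt (pvSufItems m (p :: rest) ++ pvAllItems m rest) W
        = (pvFirstAt (pvSufItems m (p :: rest)) W).or (pvFirstAt (pvAllItems m rest) W) := by
      rw [pvFirstAt, List.findSome?_append]
      rfl
    rw [happ, ih]
    congr 1
    have hmap : pvSufItems m (p :: rest) = (List.range (rest.length + 1)).map
        (fun k => (1 + k, (PySem.Dict.mk m).get? (PySem.Str.join " " ((p :: rest).take (k + 1))))) := by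
      rw [pvSufItems]
      simp only [List.length_cons]
      apply List.map_congr_left
      intro k _
      rw [show k + 1 = 1 + k by omega]
    rw [hmap, pvFirstAt, pvBlockFind]
    by_cases hc : W ≤ rest.length + 1
    · rw [if_pos (by omega), if_pos hc, show W - 1 + 1 = W by omega]
    · rw [if_neg (by omega), if_neg hc]

theorem pvScan_eq_inner (m : List (String × String)) (W : Nat) (hW : 1 ≤ W) :
    ∀ l : List String, W ≤ l.length →
      (List.range (l.length - W + 1)).findSome? (fun s => pvG m l s W) = pvScanW m W l := by
  intro l
  induction l with
  | nil => intro h; simp at h; omega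
  | cons p rest ih =>
    intro hle
    have hle' : W ≤ rest.length + 1 := by
      simpa using hle
    rw [pvScanW, if_pos hle']
    have hhead : pvG m (p :: rest) 0 W
        = (PySem.Dict.mk m).get? (PySem.Str.join " " ((p :: rest).take W)) := rfl
    by_cases he : W = rest.length + 1
    · have h1 : (p :: rest).length - W + 1 = 1 := by
        simp only [List.length_cons]
        omega
      rw [h1]
      have hrest : pvScanW m W rest = none :=
        pvScanW_none_of_long m W rest (by omega)
      rw [hrest, Option.or_none]
      show (List.range 1).findSome? (fun s => pvG m (p :: rest) s W) = _
      rw [show List.range 1 = [0] from rfl]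
      cases hg : pvG m (p :: rest) 0 W with
      | some x =>
        rw [List.findSome?_cons_of_isSome (by simp [hg]), hg, ← hhead, hg]
      | none =>
        rw [List.findSome?_cons_of_isNone (by simp [hg]), List.findSome?_nil, ← hhead, hg]
    · have h1 : (p :: rest).length - W + 1 = (rest.length - W + 1) + 1 := by
        simp only [List.length_cons]
        omega
      rw [h1, List.range_succ_eq_map]
      have htail : (List.findSome? (fun s => pvG m (p :: rest) s W)
            (List.map Nat.succ (List.range (rest.length - W + 1))))
          = pvScanW m W rest := by
        rw [List.findSome?_map]
        have hfun : ((fun s => pvG m (p :: rest) s W) ∘ Nat.succ)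
            = (fun s => pvG m rest s W) := rfl
        rw [hfun]
        exact ih (by omega)
      cases hg : pvG m (p :: rest) 0 W with
      | some x =>
        rw [List.findSome?_cons_of_isSome (by simp [hg]), hg, ← hhead, hg]
        rfl
      | none =>
        rw [List.findSome?_cons_of_isNone (by simp [hg]), htail, ← hhead, hg]
        rfl

theorem pvAllItems_bounds (m : List (String × String)) :
    ∀ (l : List String) (it : Nat × Option String),
      it ∈ pvAllItems m l → 1 ≤ it.1 ∧ it.1 ≤ l.length := by
  intro l
  induction l with
  | nil => intro it h; simp [pvAllItems] at h
  | cons p rest ih =>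
    intro it h
    rw [pvAllItems] at h
    rcases List.mem_append.mp h with h | h
    · rw [pvSufItems] at h
      rcases List.mem_map.mp h with ⟨k, hk, he⟩
      subst he
      simp only [List.length_cons] at hk ⊢
      have := List.mem_range.mp hk
      omega
    · have := ih it h
      simp only [List.length_cons]
      omega

theorem pvMem_allItems (m : List (String × String)) :
    ∀ (l : List String) (s w : Nat), 1 ≤ w → s + w ≤ l.length →
      (w, pvG m l s w) ∈ pvAllItems m l := by
  intro l
  induction l with
  | nil => intro s w h1 h2; simp at h2; omega
  | cons p rest ih =>
    intro s w h1 h2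
    rw [pvAllItems]
    cases s with
    | zero =>
      apply List.mem_append_left
      rw [pvSufItems]
      apply List.mem_map.mpr
      refine ⟨w - 1, List.mem_range.mpr (by simp at h2 ⊢; omega), ?_⟩
      rw [show w - 1 + 1 = w by omega]
      rfl
    | succ s' =>
      apply List.mem_append_right
      have := ih s' w h1 (by simp at h2; omega)
      exact this

theorem pvFirstAt_isSome (W : Nat) :
    ∀ (items : List (Nat × Option String)) (it : Nat × Option String),
      it ∈ items → it.1 = W → it.2.isSome → (pvFirstAt items W).isSome := by
  intro items
  induction items with
  | nil => intro it h; simp at h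
  | cons hd rest ih =>
    intro it hmem hW hs
    rw [pvFirstAt, List.findSome?_cons]
    rcases List.mem_cons.mp hmem with h | h
    · subst h
      rw [if_pos hW]
      rcases Option.isSome_iff_exists.mp hs with ⟨x, hx⟩
      rw [hx]
      rfl
    · cases hhd : (if hd.1 = W then hd.2 else none) with
      | some x => rfl
      | none => exact ih it h hW hs

theorem pvA_norm (tokens : List String) (m : List (String × String))
    (h : tokens.isEmpty = false) :
    extract_phrase_py tokens m = (pvWidthsDesc tokens.length).findSome?
      (fun w => (List.range (tokens.length - w + 1)).findSome?
        (fun s => pvG m (tokens.map PySem.Str.lower) s w)) := by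
  simp only [extract_phrase_py, h, Bool.false_eq_true, if_false]
  rw [pvWidths_cast tokens.length]
  apply pvFindSome?_map_congr
  intro w hw
  rcases (pvMem_widthsDesc tokens.length w).mp hw with ⟨hw1, hw2⟩
  have h1 : PySem.List.pyRange 0 ((tokens.length : Int) - w + 1) 1
      = (List.range (tokens.length - w + 1)).map ((fun k => ((0 : Int) + k)) : Nat → Int) := by
    rw [PySem.List.pyRange_one]
    have h2 : ((tokens.length : Int) - w + 1 - 0).toNat = tokens.length - w + 1 := by omega
    rw [h2]
  rw [h1]
  apply pvFindSome?_map_congr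
  intro st hst
  rw [zero_add, pvG]
  congr 2
  exact PySem.List.slice_natCast_add (tokens.map PySem.Str.lower) st w

theorem pvB_norm (tokens : List String) (m : List (String × String))
    (h : tokens.isEmpty = false) :
    extract_phrase_py_alt tokens m
      = ((pvAllItems m (tokens.map PySem.Str.lower)).foldl pvSel (0, none)).2 := by
  simp only [extract_phrase_py_alt, h, Bool.false_eq_true, if_false]
  rw [pvOuter_eq]

theorem pvInner_none (tokens : List String) (m : List (String × String)) (w : Nat)
    (hw1 : 1 ≤ w) (hw2 : w ≤ tokens.length)
    (hub : ∀ it ∈ pvAllItems m (tokens.map PySem.Str.lower), it.2.isSome → it.1 < w) :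
    (List.range (tokens.length - w + 1)).findSome?
      (fun s => pvG m (tokens.map PySem.Str.lower) s w) = none := by
  apply List.findSome?_eq_none_iff.mpr
  intro s hs
  cases hg : pvG m (tokens.map PySem.Str.lower) s w with
  | none => rfl
  | some v =>
    exfalso
    have hsw : s + w ≤ (tokens.map PySem.Str.lower).length := by
      rw [List.length_map]
      have := List.mem_range.mp hs
      omega
    have hmem := pvMem_allItems m (tokens.map PySem.Str.lower) s w hw1 hsw
    have hlt := hub _ hmem (by rw [hg]; rfl)
    simp at hlt

theorem pvMain (tokens : List String) (m : List (String × String)) :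
    extract_phrase_py tokens m = extract_phrase_py_alt tokens m := by
  by_cases hemp : tokens.isEmpty
  · rw [extract_phrase_py, extract_phrase_py_alt, if_pos hemp, if_pos hemp]
  · have h : tokens.isEmpty = false := by
      simpa using hemp
    rw [pvA_norm tokens m h, pvB_norm tokens m h, pvSel_spec]
    have hlen : (tokens.map PySem.Str.lower).length = tokens.length := List.length_map ..
    by_cases h0 : pvMaxW (pvAllItems m (tokens.map PySem.Str.lower)) ((0, (none : Option String)).1) = (0, (none : Option String)).1
    · rw [if_pos h0]
      apply pvWidthsDesc_none
      intro w hw1 hw2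
      apply pvInner_none tokens m w hw1 hw2
      intro it hmem hsome
      have hb := (pvMaxW_ub (pvAllItems m (tokens.map PySem.Str.lower)) 0 it hmem hsome)
      have h0' : pvMaxW (pvAllItems m (tokens.map PySem.Str.lower)) 0 = 0 := h0
      rw [h0'] at hb
      have hlb := (pvAllItems_bounds m (tokens.map PySem.Str.lower) it hmem).1
      omega
    · rw [if_neg h0]
      have h0' : pvMaxW (pvAllItems m (tokens.map PySem.Str.lower)) 0 ≠ 0 := h0
      have hW1 : 1 ≤ pvMaxW (pvAllItems m (tokens.map PySem.Str.lower)) 0 := by omega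
      rcases pvMaxW_mem (pvAllItems m (tokens.map PySem.Str.lower)) 0 with hc | ⟨it, hmem, hit1, hits⟩
      · exact absurd hc h0'
      have hWn : pvMaxW (pvAllItems m (tokens.map PySem.Str.lower)) 0 ≤ tokens.length := by
        have := (pvAllItems_bounds m (tokens.map PySem.Str.lower) it hmem).2
        rw [hlen] at this
        omega
      have hfs : (pvFirstAt (pvAllItems m (tokens.map PySem.Str.lower))
          (pvMaxW (pvAllItems m (tokens.map PySem.Str.lower)) 0)).isSome :=
        pvFirstAt_isSome _ _ it hmem hit1 hits
      rcases Option.isSome_iff_exists.mp hfs with ⟨v, hv⟩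
      have hvgoal : pvFirstAt (pvAllItems m (tokens.map PySem.Str.lower))
          (pvMaxW (pvAllItems m (tokens.map PySem.Str.lower)) ((0, (none : Option String)).1)) = some v := hv
      rw [hvgoal]
      apply pvWidthsDesc_top _ _ v tokens.length hW1 hWn
      · intro w hwa hwb
        apply pvInner_none tokens m w (by omega) hwb
        intro it' hmem' hsome'
        have hb := (pvMaxW_ub (pvAllItems m (tokens.map PySem.Str.lower)) 0 it' hmem' hsome')
        omega
      · have hWl : pvMaxW (pvAllItems m (tokens.map PySem.Str.lower)) 0
            ≤ (tokens.map PySem.Str.lower).length := by omega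
        rw [show tokens.length = (tokens.map PySem.Str.lower).length from hlen.symm,
          pvScan_eq_inner m _ hW1 (tokens.map PySem.Str.lower) hWl,
          ← pvFirstAt_allItems m _ hW1 (tokens.map PySem.Str.lower)]
        exact hv

-- ===== VERDICT (by name: the statement is the Claim_ definition above) =====
theorem extract_phrase_py_spec : Claim_equal_extract_phrase_py := by
  intro tokens mapping _
  unfold Spec_extract_phrase_py
  exact pvMain tokens mapping
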